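-- pv_equiv track=rewrite | github.com/Jessewb786/Silaty | hijra.py | hijri_days_before_month
-- ===== SOURCE A (Python) =====
-- __p_const=191
--
-- __q_const=360
--
-- __a_const=48
--
-- def hijri_days_before_month(Y,M):
--    """Return the number of days before a given moth M in a given year Y (0 for M=1)"""
--    Mc = (Y -1) *12 + 1 + __a_const
--    McM=Mc * __p_const
--    sum=0
--    for i in range(1,M):
--       if (McM % __q_const)  < __p_const : sum+=30
--       else: sum+=29
--       McM+=__p_const
--    return sum
-- ===== SOURCE B (Python) =====
-- def hijri_days_before_month(Y, M):
--     """Closed form: 29 days per month plus telescoping leap-day count from floor divisions."""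
--     if M <= 1:
--         return 0
--     Mc = (Y - 1) * 12 + 49
--     return 29 * (M - 1) + (191 * (Mc + M - 2)) // 360 - (191 * (Mc - 1)) // 360
-- ===== Notes on version B (the rewrite author's own statement) =====
-- stated objective: faster
-- what changed: Replaced the per-month loop (29/30 days decided by a running 191*k mod 360 test) with a closed-form telescoping sum 29*(M-1) + floor(191*(Mc+M-2)/360) - floor(191*(Mc-1)/360).
import Mathlib
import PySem

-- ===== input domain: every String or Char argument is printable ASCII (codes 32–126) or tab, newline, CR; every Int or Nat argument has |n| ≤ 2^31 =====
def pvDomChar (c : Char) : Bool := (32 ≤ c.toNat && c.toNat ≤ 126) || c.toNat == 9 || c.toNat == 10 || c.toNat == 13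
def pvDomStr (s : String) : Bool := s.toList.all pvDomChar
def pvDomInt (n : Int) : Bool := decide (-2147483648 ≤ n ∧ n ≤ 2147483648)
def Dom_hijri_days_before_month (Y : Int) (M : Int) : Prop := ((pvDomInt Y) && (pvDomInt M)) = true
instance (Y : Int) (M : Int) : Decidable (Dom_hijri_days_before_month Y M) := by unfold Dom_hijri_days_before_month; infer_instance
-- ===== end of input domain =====

-- B replaces A's per-month 29/30 loop with an O(1) closed-form telescoping sum (objective: faster).

-- ===== PORT A =====
-- literal port: Mc = (Y-1)*12 + 1 + 48; McM = Mc*191; loop i in range(1, M) keeping (sum, McM)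
def hijri_days_before_month (Y : Int) (M : Int) : Int :=
  let Mc : Int := (Y - 1) * 12 + 1 + 48
  let McM : Int := Mc * 191
  let st := (PySem.List.pyRange 1 M 1).foldl
    (fun (st : Int × Int) (_ : Int) =>
      if PySem.Int.mod st.2 360 < 191 then (st.1 + 30, st.2 + 191)
      else (st.1 + 29, st.2 + 191))
    (0, McM)
  st.1

-- ===== PORT B =====
def hijri_days_before_month_alt (Y : Int) (M : Int) : Int :=
  if M ≤ 1 then 0
  else
    let Mc : Int := (Y - 1) * 12 + 49
    29 * (M - 1) + PySem.Int.floordiv (191 * (Mc + M - 2)) 360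
      - PySem.Int.floordiv (191 * (Mc - 1)) 360

-- ===== PRECONDITION & SPEC =====
def Spec_hijri_days_before_month (Y : Int) (M : Int) (out : Int) : Prop := out = hijri_days_before_month_alt Y M
instance (Y : Int) (M : Int) (out : Int) : Decidable (Spec_hijri_days_before_month Y M out) := by unfold Spec_hijri_days_before_month; infer_instance

-- ===== CLAIM (what is proved, stated in full; the proofs are below) =====
def Claim_equal_hijri_days_before_month : Prop := ∀ (Y : Int) (M : Int), Dom_hijri_days_before_month Y M → Spec_hijri_days_before_month Y M (hijri_days_before_month Y M)

-- ===== LEMMAS AND PROOFS =====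

-- A's loop body, with the loop counter ignored (as in A).
def pvStep (st : Int × Int) : Int × Int :=
  if PySem.Int.mod st.2 360 < 191 then (st.1 + 30, st.2 + 191)
  else (st.1 + 29, st.2 + 191)

lemma pvFoldl_eq_iterate (l : List Int) (st : Int × Int) :
    l.foldl (fun (st : Int × Int) (_ : Int) =>
        if PySem.Int.mod st.2 360 < 191 then (st.1 + 30, st.2 + 191)
        else (st.1 + 29, st.2 + 191)) st
      = pvStep^[l.length] st := by
  induction l generalizing st with
  | nil => simp
  | cons x xs ih =>
    rw [List.foldl_cons, List.length_cons, Function.iterate_succ_apply, ih]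
    rfl

-- Per-step: the 191*k mod 360 < 191 test is exactly "floor(191*k/360) jumped from k-1 to k".
lemma pvStep_mod (k : Int) :
    (if PySem.Int.mod (191 * k) 360 < 191 then (30 : Int) else 29)
      = 29 + (191 * k) / 360 - (191 * (k - 1)) / 360 := by
  rw [PySem.Int.mod_eq_emod_of_pos (by norm_num : (0:Int) < 360)]
  split_ifs with h <;> omega

-- Invariant: n iterations starting from (s, 191*k).
lemma pvIterate_closed (n : Nat) (k s : Int) :
    pvStep^[n] (s, 191 * k)
      = (s + 29 * n + (191 * (k + n - 1)) / 360 - (191 * (k - 1)) / 360, 191 * (k + n)) := by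
  induction n generalizing k s with
  | zero => simp
  | succ n ih =>
    rw [Function.iterate_succ_apply]
    have hstep : pvStep (s, 191 * k)
        = (s + (29 + (191 * k) / 360 - (191 * (k - 1)) / 360), 191 * (k + 1)) := by
      have hm := pvStep_mod k
      unfold pvStep
      split_ifs at hm ⊢ with h <;> refine Prod.ext ?_ (by ring) <;> simp only [] <;> omega
    rw [hstep, ih (k + 1)]
    have e1 : k + 1 + (n : Int) - 1 = k + (n + 1 : Nat) - 1 := by push_cast; ring
    have e2 : k + 1 - 1 = k := by ring
    rw [e1, e2]
    refine Prod.ext ?_ (by push_cast; ring)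
    simp only []
    push_cast
    ring

-- ===== VERDICT (by name: the statement is the Claim_ definition above) =====
theorem hijri_days_before_month_spec : Claim_equal_hijri_days_before_month := by
  intro Y M _
  unfold Spec_hijri_days_before_month hijri_days_before_month hijri_days_before_month_alt
  simp only []
  set Mc : Int := (Y - 1) * 12 + 1 + 48 with hMc
  have hmul : Mc * 191 = 191 * Mc := by ring
  rw [hmul, pvFoldl_eq_iterate, PySem.List.length_pyRange_one, pvIterate_closed]
  by_cases hM : M ≤ 1
  · have h0 : (M - 1).toNat = 0 := by omega
    rw [h0]
    simp [hM]
  · have hn : ((M - 1).toNat : Int) = M - 1 := by omega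
    rw [if_neg hM,
      PySem.Int.floordiv_eq_ediv_of_pos (by norm_num : (0:Int) < 360),
      PySem.Int.floordiv_eq_ediv_of_pos (by norm_num : (0:Int) < 360)]
    have h1 : Mc + ((M - 1).toNat : Int) - 1 = ((Y - 1) * 12 + 49) + M - 2 := by omega
    have h2 : Mc - 1 = ((Y - 1) * 12 + 49) - 1 := by omega
    rw [h1, h2, hn]
    ring
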